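-- pv_equiv track=rewrite | github.com/shaloms4/Competitive-Programming | A2SV G6 - First Camp Triad Contest 06-Apr-2025/F - Covered Points Count 327211.py | covered_points_count
-- ===== SOURCE A (Python) =====
-- def covered_points_count(n, segments):
--     coords = set()
--
--     for l, r in segments:
--         coords.add(l)
--         coords.add(r + 1)
--
--     sorted_coords = sorted(coords)
--     coord_to_index = {coord: i for i, coord in enumerate(sorted_coords)}
--
--     diff = [0] * (len(sorted_coords) + 1)
--
--     for l, r in segments:
--         diff[coord_to_index[l]] += 1
--         diff[coord_to_index[r + 1]] -= 1
--
--     result = [0] * (n + 1)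
--     current = 0
--
--     for i in range(len(sorted_coords) - 1):
--         current += diff[i]
--         length = sorted_coords[i + 1] - sorted_coords[i]
--         if current > 0:
--             result[current] += length
--
--     return result[1:]
-- ===== SOURCE B (Python) =====
-- def covered_points_count(n, segments):
--     events = []
--     for l, r in segments:
--         events.append((l, 1))
--         events.append((r + 1, -1))
--     events.sort()
--
--     cover = {}
--     current = 0
--     prev = None
--     for coord, delta in events:
--         if prev is not None and current > 0:
--             cover[current] = cover.get(current, 0) + (coord - prev)
--         current += delta
--         prev = coord
--
--     return [cover.get(k, 0) for k in range(1, n + 1)]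
-- ===== Notes on version B (the rewrite author's own statement) =====
-- stated objective: simpler
-- what changed: Replaced coordinate compression (set of endpoints, sorted list, coord->index dict, difference array, second indexed sweep) by a single sorted event list ((l,+1),(r+1,-1)) swept once with a running count and a count->length dict, so no index map or diff array is built.
import Mathlib
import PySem

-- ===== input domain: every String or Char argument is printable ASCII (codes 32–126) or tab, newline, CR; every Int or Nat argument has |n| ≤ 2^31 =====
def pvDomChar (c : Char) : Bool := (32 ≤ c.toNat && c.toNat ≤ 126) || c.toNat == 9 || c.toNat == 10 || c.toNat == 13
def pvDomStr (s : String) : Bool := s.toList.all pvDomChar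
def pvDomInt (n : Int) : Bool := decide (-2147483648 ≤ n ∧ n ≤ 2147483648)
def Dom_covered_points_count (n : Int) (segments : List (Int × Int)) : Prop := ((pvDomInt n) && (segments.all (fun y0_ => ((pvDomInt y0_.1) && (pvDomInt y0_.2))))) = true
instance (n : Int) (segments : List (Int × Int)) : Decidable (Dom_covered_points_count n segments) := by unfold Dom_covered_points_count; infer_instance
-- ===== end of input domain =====

-- B replaces A's coordinate compression (endpoint set + sorted list + coord->index dict + difference
-- array + indexed sweep) by one sorted (l,+1)/(r+1,-1) event list swept once with a running count and
-- a count->length dict: a simpler, shorter single-sweep algorithm with the same output.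

-- ===== PORT A =====
-- A-side helpers: each mirrors one block of the Python function, in order.

-- coords = set();  for l, r in segments: coords.add(l); coords.add(r + 1)
def pvCoordsA (segments : List (Int × Int)) : PySem.Set Int :=
  segments.foldl (fun c p => PySem.Set.add (PySem.Set.add c p.1) (p.2 + 1)) PySem.Set.empty

-- sorted_coords = sorted(coords)
def pvSortedA (segments : List (Int × Int)) : List Int :=
  PySem.List.sorted (pvCoordsA segments) (fun x => x) false

-- coord_to_index = {coord: i for i, coord in enumerate(sorted_coords)}
def pvC2I (segments : List (Int × Int)) : PySem.Dict Int Int :=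
  (PySem.List.enumerate (pvSortedA segments) 0).foldl (fun d p => d.insert p.2 p.1) PySem.Dict.empty

-- diff = [0] * (len(sorted_coords) + 1);  for l, r in segments: diff[c2i[l]] += 1; diff[c2i[r+1]] -= 1
-- (every endpoint is a key of coord_to_index, so getD's default is never used and the written
--  indices are always in range: this is exact where the Python does not raise)
def pvDiffA (segments : List (Int × Int)) : List Int :=
  segments.foldl
    (fun d p =>
      (d.modify ((pvC2I segments).getD p.1 0).toNat (· + 1)).modify
        ((pvC2I segments).getD (p.2 + 1) 0).toNat (· + (-1)))
    (List.replicate ((pvSortedA segments).length + 1) 0)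

-- loop body: current += diff[i]; length = sorted_coords[i+1] - sorted_coords[i];
--            if current > 0: result[current] += length
-- (result[current] raises IndexError in Python when n < current; Pre_ excludes exactly those inputs,
--  so the out-of-range no-op of List.modify is never reached on admitted inputs)
def pvBodyA (segments : List (Int × Int)) : List Int × Int → Int → List Int × Int := fun st i =>
  let current := st.2 + PySem.List.pyGetD (pvDiffA segments) i 0
  let length := PySem.List.pyGetD (pvSortedA segments) (i + 1) 0 -
    PySem.List.pyGetD (pvSortedA segments) i 0
  (if 0 < current then st.1.modify current.toNat (· + length) else st.1, current)

-- result = [0] * (n + 1); current = 0;  for i in range(len(sorted_coords) - 1): ...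
def pvLoopA (n : Int) (segments : List (Int × Int)) : List Int × Int :=
  (PySem.List.pyRange 0 (((pvSortedA segments).length : Int) - 1) 1).foldl
    (pvBodyA segments) (List.replicate (n + 1).toNat 0, 0)

-- return result[1:]
def covered_points_count (n : Int) (segments : List (Int × Int)) : List Int :=
  PySem.List.slice (pvLoopA n segments).1 (some 1) none

-- ===== PORT B =====
-- B-side helpers, mirroring Source B block by block.

-- events = []; for l, r in segments: events.append((l, 1)); events.append((r + 1, -1))
def pvEventsB (segments : List (Int × Int)) : List (Int × Int) :=
  segments.foldl (fun acc p => (acc ++ [(p.1, 1)]) ++ [(p.2 + 1, -1)]) []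

-- events.sort()   (tuples compare lexicographically)
def pvSortB (segments : List (Int × Int)) : List (Int × Int) :=
  PySem.List.sorted2 (pvEventsB segments) (·.1) (·.2) false

-- loop body: if prev is not None and current > 0: cover[current] = cover.get(current, 0) + (coord - prev)
--            current += delta; prev = coord
def pvBodyB : PySem.Dict Int Int × Int × Option Int → Int × Int →
    PySem.Dict Int Int × Int × Option Int := fun st e =>
  let cover :=
    match st.2.2 with
    | some prev =>
        if 0 < st.2.1 then st.1.insert st.2.1 (st.1.getD st.2.1 0 + (e.1 - prev)) else st.1
    | none => st.1
  (cover, st.2.1 + e.2, some e.1)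

-- cover = {}; current = 0; prev = None; for coord, delta in events: ...
def pvSweepB (segments : List (Int × Int)) : PySem.Dict Int Int × Int × Option Int :=
  (pvSortB segments).foldl pvBodyB (PySem.Dict.empty, 0, none)

-- return [cover.get(k, 0) for k in range(1, n + 1)]
def covered_points_count_alt (n : Int) (segments : List (Int × Int)) : List Int :=
  (PySem.List.pyRange 1 (n + 1) 1).map (fun k => (pvSweepB segments).1.getD k 0)

-- ===== PRECONDITION & SPEC =====
-- pvCurAt segments x = number of segments with l <= x minus number with r + 1 <= x:
-- the running count A accumulates at coordinate x.
def pvCurAt (segments : List (Int × Int)) (x : Int) : Int :=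
  (segments.map (fun p => (if p.1 ≤ x then (1 : Int) else 0) - (if p.2 + 1 ≤ x then (1 : Int) else 0))).sum

-- A raises IndexError (result[current] with current > n) exactly when at some endpoint the running
-- count is positive and exceeds n; Pre_ admits exactly the inputs on which A returns.
def Pre_covered_points_count (n : Int) (segments : List (Int × Int)) : Prop :=
  ∀ p ∈ segments,
    (pvCurAt segments p.1 ≤ n ∨ pvCurAt segments p.1 ≤ 0) ∧
    (pvCurAt segments (p.2 + 1) ≤ n ∨ pvCurAt segments (p.2 + 1) ≤ 0)

instance (n : Int) (segments : List (Int × Int)) : Decidable (Pre_covered_points_count n segments) := by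
  unfold Pre_covered_points_count; infer_instance

def pvWitness_covered_points_count : Int × (List (Int × Int)) := (2, [(0, 1), (1, 2)])

def Spec_covered_points_count (n : Int) (segments : List (Int × Int)) (out : List Int) : Prop :=
  out = covered_points_count_alt n segments
instance (n : Int) (segments : List (Int × Int)) (out : List Int) : Decidable (Spec_covered_points_count n segments out) := by
  unfold Spec_covered_points_count; infer_instance

-- ===== CLAIM (what is proved, stated in full; the proofs are below) =====
def Claim_equal_covered_points_count : Prop := ∀ (n : Int) (segments : List (Int × Int)), Dom_covered_points_count n segments → Pre_covered_points_count n segments → Spec_covered_points_count n segments (covered_points_count n segments)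

-- ===== LEMMAS AND PROOFS =====

-- The raw event list (l,+1),(r+1,-1) per segment, in segment order.
def pvE (s : List (Int × Int)) : List (Int × Int) := s.flatMap (fun p => [(p.1, 1), (p.2 + 1, -1)])

-- All endpoints, in segment order.
def pvEps (s : List (Int × Int)) : List Int := s.flatMap (fun p => [p.1, p.2 + 1])

-- merge adjacent events with equal coordinate, summing deltas
def pvCollapse : List (Int × Int) → List (Int × Int)
  | [] => []
  | [e] => [e]
  | (x, d) :: (y, e) :: t =>
      if x = y then pvCollapse ((x, d + e) :: t) else (x, d) :: pvCollapse ((y, e) :: t)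
termination_by l => l.length

-- B's sweep contribution to key k, starting with current = c after last coordinate p.
def pvBAdj : Int → Int → List (Int × Int) → Int → Int
  | _, _, [], _ => 0
  | c, p, (x, d) :: t, k => (if 0 < c ∧ c = k then x - p else 0) + pvBAdj (c + d) x t k

def pvSpecOf (cl : List (Int × Int)) (k : Int) : Int :=
  match cl with
  | [] => 0
  | (c0, d0) :: clt => pvBAdj d0 c0 clt k

-- the collapsed sorted event list, its coordinates, per-coordinate delta and prefix sums
def pvCl (s : List (Int × Int)) : List (Int × Int) := pvCollapse (pvSortB s)
def pvSpec (s : List (Int × Int)) (k : Int) : Int := pvSpecOf (pvCl s) k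
def pvCs (s : List (Int × Int)) : List Int := (pvCl s).map (·.1)
def pvD (s : List (Int × Int)) (j : Nat) : Int := (PySem.List.pyGetD (pvCl s) (j : Int) (0, 0)).2
def pvCsI (s : List (Int × Int)) (j : Nat) : Int := PySem.List.pyGetD (pvCs s) (j : Int) 0
def pvS (s : List (Int × Int)) : Nat → Int
  | 0 => 0
  | t + 1 => pvS s t + pvD s t
def pvPartial (s : List (Int × Int)) : Nat → Int → Int
  | 0, _ => 0
  | t + 1, k =>
      pvPartial s t k +
        (if 0 < pvS s (t + 1) ∧ pvS s (t + 1) = k then pvCsI s (t + 1) - pvCsI s t else 0)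

-- the strict lexicographic order sorted2 uses
def pvLt (a b : Int × Int) : Bool :=
  decide (a.1 < b.1) || (!decide (b.1 < a.1) && decide (a.2 < b.2))

lemma pvSortB_eq (s : List (Int × Int)) :
    pvSortB s = (pvEventsB s).foldl (fun acc x => PySem.List.insertBy pvLt x acc) [] := rfl

lemma pvEventsB_eq (s : List (Int × Int)) : pvEventsB s = pvE s := by
  have h : ∀ (l : List (Int × Int)) (acc : List (Int × Int)),
      l.foldl (fun acc p => (acc ++ [(p.1, (1:Int))]) ++ [(p.2 + 1, (-1:Int))]) acc =
        acc ++ l.flatMap (fun p => [(p.1, 1), (p.2 + 1, -1)]) := by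
    intro l
    induction l with
    | nil => simp
    | cons p t ih => intro acc; rw [List.foldl_cons, ih]; simp [List.flatMap_cons]
  simpa [pvEventsB, pvE] using h s []

lemma pvLt_asymm {a b : Int × Int} (h : pvLt a b = true) : pvLt b a = false := by
  simp [pvLt] at *; omega

lemma pvLt_trans {a b c : Int × Int} (h1 : pvLt a b = true) (h2 : pvLt b c = true) :
    pvLt a c = true := by
  simp [pvLt] at *; omega

lemma pvInsertBy_pairwise (x : Int × Int) (ys : List (Int × Int))
    (h : ys.Pairwise (fun a b => pvLt b a = false)) :
    (PySem.List.insertBy pvLt x ys).Pairwise (fun a b => pvLt b a = false) := by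
  induction ys with
  | nil => simp [PySem.List.insertBy]
  | cons y t ih =>
      rw [List.pairwise_cons] at h
      obtain ⟨h1, h2⟩ := h
      by_cases hxy : pvLt x y = true
      · rw [show PySem.List.insertBy pvLt x (y :: t) = x :: y :: t by
          simp [PySem.List.insertBy, hxy]]
        rw [List.pairwise_cons]
        refine ⟨?_, List.pairwise_cons.mpr ⟨h1, h2⟩⟩
        intro b hb
        rcases List.mem_cons.mp hb with rfl | hbt
        · exact pvLt_asymm hxy
        · by_contra hc
          have hbx : pvLt b x = true := by
            cases hbx : pvLt b x with
            | true => rfl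
            | false => exact absurd hbx hc
          have : pvLt b y = true := pvLt_trans hbx hxy
          rw [h1 b hbt] at this
          exact Bool.false_ne_true this
      · rw [show PySem.List.insertBy pvLt x (y :: t) = y :: PySem.List.insertBy pvLt x t by
          simp [PySem.List.insertBy, hxy]]
        rw [List.pairwise_cons]
        refine ⟨?_, ih h2⟩
        intro b hb
        have := PySem.List.mem_insertBy (before := pvLt) (x := x) (ys := t) (y := b) |>.mp hb
        rcases this with rfl | hbt
        · simpa using hxy
        · exact h1 b hbt

lemma pvSortB_pairwise (s : List (Int × Int)) :
    (pvSortB s).Pairwise (fun a b => pvLt b a = false) := by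
  rw [pvSortB_eq]
  have h : ∀ (l acc : List (Int × Int)), acc.Pairwise (fun a b => pvLt b a = false) →
      (l.foldl (fun acc x => PySem.List.insertBy pvLt x acc) acc).Pairwise
        (fun a b => pvLt b a = false) := by
    intro l
    induction l with
    | nil => intro acc h; exact h
    | cons x t ih => intro acc h; exact ih _ (pvInsertBy_pairwise x acc h)
  exact h _ [] List.Pairwise.nil

lemma pvSortB_fst_pairwise (s : List (Int × Int)) :
    (pvSortB s).Pairwise (fun a b => a.1 ≤ b.1) := by
  refine (pvSortB_pairwise s).imp ?_
  intro a b h; simp [pvLt] at h; omega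

lemma pvSortB_perm (s : List (Int × Int)) : (pvSortB s).Perm (pvE s) := by
  rw [pvSortB, pvEventsB_eq]; exact PySem.List.sorted2_perm _ _ _ _

-- collapse preserves coordinate-weighted sums
lemma pvCollapse_sum (g : Int → Int) :
    ∀ l : List (Int × Int),
      ((pvCollapse l).map (fun e => g e.1 * e.2)).sum = (l.map (fun e => g e.1 * e.2)).sum := by
  intro l
  induction l using pvCollapse.induct with
  | case1 => simp [pvCollapse]
  | case2 e => simp [pvCollapse]
  | case3 d y e t ih => simp only [pvCollapse, if_true] at ih ⊢; simp at ih ⊢; rw [ih]; ring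
  | case4 x d y e t h ih => simp only [pvCollapse, if_neg h]; simp at ih ⊢; rw [ih]

lemma pvCollapse_fst_mem (x : Int) :
    ∀ l : List (Int × Int), x ∈ (pvCollapse l).map (·.1) ↔ x ∈ l.map (·.1) := by
  intro l
  induction l using pvCollapse.induct with
  | case1 => simp [pvCollapse]
  | case2 e => simp [pvCollapse]
  | case3 d y e t ih => simp only [pvCollapse, if_true] at ih ⊢; simp at ih ⊢; tauto
  | case4 a d y e t h ih => simp only [pvCollapse, if_neg h]; simp at ih ⊢; tauto

lemma pvCollapse_fst_pairwise :
    ∀ l : List (Int × Int), l.Pairwise (fun a b => a.1 ≤ b.1) →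
      (pvCollapse l).Pairwise (fun a b : Int × Int => a.1 < b.1) := by
  intro l
  induction l using pvCollapse.induct with
  | case1 => intro; simp [pvCollapse]
  | case2 e => intro; simp [pvCollapse]
  | case3 d y e t ih =>
      intro hp
      simp only [pvCollapse, if_true]
      apply ih
      rw [List.pairwise_cons] at hp ⊢
      obtain ⟨h1, h2⟩ := hp
      rw [List.pairwise_cons] at h2
      exact ⟨fun b hb => h2.1 b hb, h2.2⟩
  | case4 a d y e t h ih =>
      intro hp
      simp only [pvCollapse, if_neg h]
      rw [List.pairwise_cons] at hp
      obtain ⟨h1, h2⟩ := hp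
      rw [List.pairwise_cons]
      refine ⟨?_, ih h2⟩
      intro b hb
      have hb2 : b.1 ∈ (pvCollapse ((y, e) :: t)).map (·.1) := List.mem_map_of_mem hb
      rw [pvCollapse_fst_mem] at hb2
      simp at hb2
      have hay : a < y := lt_of_le_of_ne (h1 (y, e) (by simp)) h
      rcases hb2 with hb2 | ⟨b2, hb2⟩
      · omega
      · have := (List.pairwise_cons.mp h2).1 (b.1, b2) hb2
        simp at this
        omega

lemma pvCollapse_bAdj : ∀ (l : List (Int × Int)) (c p k : Int),
    pvBAdj c p (pvCollapse l) k = pvBAdj c p l k := by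
  intro l
  induction l using pvCollapse.induct with
  | case1 => intros; simp [pvCollapse]
  | case2 e => intros; simp [pvCollapse]
  | case3 d y e t ih =>
      intro c p k
      simp only [pvCollapse, if_true]
      rw [ih]
      simp only [pvBAdj]
      have h1 : c + (d + e) = c + d + e := by ring
      rw [h1]
      have hz : (if 0 < c + d ∧ c + d = k then y - y else 0) = 0 := by simp
      omega
  | case4 a d y e t h ih =>
      intro c p k
      simp only [pvCollapse, if_neg h, pvBAdj]
      rw [ih]
      simp only [pvBAdj]

lemma pvCollapse_head : ∀ (l : List (Int × Int)) (p c k : Int),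
    pvSpecOf (pvCollapse ((p, c) :: l)) k = pvBAdj c p l k := by
  intro l
  induction l with
  | nil => intros; simp [pvCollapse, pvSpecOf, pvBAdj]
  | cons hd t ih =>
      intro p c k
      obtain ⟨y, e⟩ := hd
      by_cases h : p = y
      · subst h
        rw [show pvCollapse ((p, c) :: (p, e) :: t) = pvCollapse ((p, c + e) :: t) by
          simp [pvCollapse]]
        rw [ih]
        simp [pvBAdj]
      · rw [show pvCollapse ((p, c) :: (y, e) :: t) = (p, c) :: pvCollapse ((y, e) :: t) by
          simp [pvCollapse, h]]
        show pvBAdj c p (pvCollapse ((y, e) :: t)) k = _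
        rw [pvCollapse_bAdj]

-- ===== A-side identification =====

lemma pvE_map_fst (s : List (Int × Int)) : (pvE s).map (·.1) = pvEps s := by
  induction s with
  | nil => rfl
  | cons p t ih => simp [pvE, pvEps, List.flatMap_cons] at ih ⊢; exact ih

lemma pvCs_pairwise (s : List (Int × Int)) : (pvCs s).Pairwise (· < ·) := by
  rw [pvCs, List.pairwise_map]
  exact pvCollapse_fst_pairwise _ (pvSortB_fst_pairwise s)

lemma pvCs_nodup (s : List (Int × Int)) : (pvCs s).Nodup :=
  (pvCs_pairwise s).imp ne_of_lt

lemma mem_pvCs (s : List (Int × Int)) (x : Int) : x ∈ pvCs s ↔ x ∈ pvEps s := by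
  rw [pvCs, pvCl, pvCollapse_fst_mem, ← pvE_map_fst]
  exact ((pvSortB_perm s).map (·.1)).mem_iff

lemma pvCoordsA_eq (s : List (Int × Int)) : pvCoordsA s = PySem.Set.ofList (pvEps s) := by
  rw [PySem.Set.ofList_eq_foldl]
  have h : ∀ (l : List (Int × Int)) (acc : PySem.Set Int),
      l.foldl (fun c p => PySem.Set.add (PySem.Set.add c p.1) (p.2 + 1)) acc =
        (l.flatMap (fun p => [p.1, p.2 + 1])).foldl PySem.Set.add acc := by
    intro l
    induction l with
    | nil => simp
    | cons p t ih => intro acc; rw [List.foldl_cons, ih]; simp [List.flatMap_cons]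
  exact h s _

lemma pvSortedA_eq (s : List (Int × Int)) : pvSortedA s = pvCs s := by
  rw [pvSortedA, pvCoordsA_eq]
  refine PySem.List.sorted_eq_of_perm_of_pairwise_lt _ _ _ ?_ (pvCs_pairwise s)
  refine (List.perm_ext_iff_of_nodup (pvCs_nodup s) (PySem.Set.nodup_ofList _)).mpr ?_
  intro a; rw [PySem.Set.mem_ofList, mem_pvCs]

lemma pvC2I_items (s : List (Int × Int)) :
    (pvC2I s).items = (PySem.List.enumerate (pvCs s) 0).map (fun p => (p.2, p.1)) := by
  rw [pvC2I, pvSortedA_eq]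
  exact PySem.Dict.items_foldl_insert_fresh (PySem.List.enumerate (pvCs s) 0)
    (fun p : Int × Int => p.2) (fun p : Int × Int => p.1) PySem.Dict.empty
    (by intro a _; simp [pysem])
    (by rw [PySem.List.map_snd_enumerate]; exact pvCs_nodup s)

lemma pvC2I_keys_nodup (s : List (Int × Int)) : (pvC2I s).keys.Nodup := by
  have h : (pvC2I s).keys = pvCs s := by
    show (pvC2I s).items.map (·.1) = _
    rw [pvC2I_items, List.map_map]
    exact PySem.List.map_snd_enumerate _ _
  rw [h]; exact pvCs_nodup s

lemma pvC2I_getD (s : List (Int × Int)) (j : Nat) (hj : j < (pvCs s).length) :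
    (pvC2I s).getD ((pvCs s)[j]) 0 = (j : Int) := by
  have hmem : ((pvCs s)[j], (j : Int)) ∈ (pvC2I s).items := by
    rw [pvC2I_items]
    refine List.mem_map.mpr ⟨((j : Int), (pvCs s)[j]), ?_, rfl⟩
    exact (PySem.List.mem_enumerate_iff _ _ _).mpr ⟨j, hj, by simp⟩
  exact PySem.Dict.getD_of_mem_items _ hmem (pvC2I_keys_nodup s) 0

lemma pvCl_length (s : List (Int × Int)) : (pvCl s).length = (pvCs s).length := by
  rw [pvCs, List.length_map]

lemma pvCs_getElem (s : List (Int × Int)) (j : Nat) (hj : j < (pvCs s).length) :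
    (pvCs s)[j] = ((pvCl s)[j]'(by rw [pvCl_length]; exact hj)).1 := by
  simp [pvCs]

lemma pvD_getElem (s : List (Int × Int)) (j : Nat) (hj : j < (pvCs s).length) :
    pvD s j = ((pvCl s)[j]'(by rw [pvCl_length]; exact hj)).2 := by
  rw [pvD, PySem.List.pyGetD_natCast, List.getD_eq_getElem _ _ (by rw [pvCl_length]; exact hj)]

lemma pvSumAt : ∀ (cl : List (Int × Int)) (c : Int) (j : Nat) (hj : j < cl.length),
    (cl[j]'hj).1 = c →
    (cl.map (·.1)).Nodup →
    (cl.map (fun e => (if e.1 = c then (1 : Int) else 0) * e.2)).sum = (cl[j]'hj).2 := by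
  intro cl
  induction cl with
  | nil => intro c j hj; simp at hj
  | cons hd t ih =>
      intro c j hj hc hnd
      rw [List.map_cons, List.nodup_cons] at hnd
      cases j with
      | zero =>
          simp only [List.getElem_cons_zero] at hc
          subst hc
          simp only [List.getElem_cons_zero, List.map_cons, List.sum_cons]
          have hall : ∀ e ∈ t, (if e.1 = hd.1 then (1 : Int) else 0) * e.2 = (fun _ => (0:Int)) e := by
            intro e he
            have hne : e.1 ≠ hd.1 := by
              intro h2
              exact hnd.1 (h2 ▸ List.mem_map_of_mem he)
            simp [hne]
          rw [List.map_congr_left hall]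
          simp
      | succ j =>
          simp only [List.getElem_cons_succ] at hc ⊢
          have hj' : j < t.length := by simpa using hj
          simp only [List.map_cons, List.sum_cons]
          have hne : hd.1 ≠ c := by
            intro h2
            exact hnd.1 (by rw [h2, ← hc]; exact List.mem_map_of_mem (List.getElem_mem hj'))
          rw [if_neg hne, zero_mul, zero_add]
          exact ih c j hj' hc hnd.2

lemma pvE_to_fold (s : List (Int × Int)) :
    pvDiffA s = (pvE s).foldl
      (fun d e => d.modify ((pvC2I s).getD e.1 0).toNat (· + e.2))
      (List.replicate ((pvSortedA s).length + 1) 0) := by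
  rw [pvDiffA]
  have h : ∀ (l : List (Int × Int)) (init : List Int),
      l.foldl (fun d p =>
        (d.modify ((pvC2I s).getD p.1 0).toNat (· + 1)).modify
          ((pvC2I s).getD (p.2 + 1) 0).toNat (· + (-1))) init =
      (l.flatMap (fun p => [(p.1, (1 : Int)), (p.2 + 1, (-1 : Int))])).foldl
        (fun d e => d.modify ((pvC2I s).getD e.1 0).toNat (· + e.2)) init := by
    intro l
    induction l with
    | nil => intro init; rfl
    | cons p t ih => intro init; rw [List.foldl_cons, ih]; simp [List.flatMap_cons]
  exact h s _

lemma pvModifyFold (s : List (Int × Int)) :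
    ∀ (evl : List (Int × Int)) (init : List Int) (j : Nat) (hj : j < init.length),
      ((evl.foldl (fun d e => d.modify ((pvC2I s).getD e.1 0).toNat (· + e.2)) init))[j]? =
        some (init[j]'hj +
          (evl.map (fun e => if ((pvC2I s).getD e.1 0).toNat = j then e.2 else 0)).sum) := by
  intro evl
  induction evl with
  | nil => intro init j hj; simp [List.getElem?_eq_getElem hj]
  | cons e t ih =>
      intro init j hj
      rw [List.foldl_cons]
      have hlen : j < (init.modify ((pvC2I s).getD e.1 0).toNat (· + e.2)).length := by
        simpa using hj
      rw [ih _ j hlen]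
      have hmod : (init.modify ((pvC2I s).getD e.1 0).toNat (· + e.2))[j]'hlen =
          init[j]'hj + (if ((pvC2I s).getD e.1 0).toNat = j then e.2 else 0) := by
        rw [List.getElem_modify]
        split_ifs <;> simp
      rw [hmod]
      simp only [List.map_cons, List.sum_cons]
      ring_nf

lemma pvDiffA_getElem (s : List (Int × Int)) (j : Nat) (hj : j < (pvCs s).length) :
    (pvDiffA s)[j]? = some (pvD s j) := by
  rw [pvE_to_fold]
  have hlen : j < (List.replicate ((pvSortedA s).length + 1) (0 : Int)).length := by
    rw [List.length_replicate, pvSortedA_eq]; omega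
  rw [pvModifyFold s _ _ j hlen]
  congr 1
  have hrep : (List.replicate ((pvSortedA s).length + 1) (0 : Int))[j]'hlen = 0 :=
    List.getElem_replicate ..
  rw [hrep, zero_add]
  -- convert the index test into a coordinate test
  have hterm : ∀ e ∈ pvE s,
      (if ((pvC2I s).getD e.1 0).toNat = j then e.2 else 0) =
        (if e.1 = (pvCs s)[j] then (1 : Int) else 0) * e.2 := by
    intro e he
    have he1 : e.1 ∈ pvCs s := by
      rw [mem_pvCs, ← pvE_map_fst]
      exact List.mem_map_of_mem he
    obtain ⟨i, hi, hie⟩ := List.mem_iff_getElem.mp he1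
    have hgd : (pvC2I s).getD e.1 0 = (i : Int) := by rw [← hie]; exact pvC2I_getD s i hi
    rw [hgd]
    have : ((i : Int)).toNat = i := Int.toNat_natCast i
    rw [this]
    by_cases hij : i = j
    · subst hij; rw [if_pos rfl, if_pos (by rw [← hie]), one_mul]
    · have : e.1 ≠ (pvCs s)[j] := by
        rw [← hie]
        intro hc
        exact hij ((List.Nodup.getElem_inj_iff (pvCs_nodup s)).mp hc)
      rw [if_neg hij, if_neg this, zero_mul]
  rw [List.map_congr_left hterm]
  have := pvCollapse_sum (fun x => if x = (pvCs s)[j] then (1 : Int) else 0) (pvSortB s)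
  have hperm := ((pvSortB_perm s).map
    (fun e : Int × Int => (if e.1 = (pvCs s)[j] then (1 : Int) else 0) * e.2)).sum_eq
  rw [← hperm, ← this]
  rw [pvD_getElem s j hj]
  exact pvSumAt (pvCl s) ((pvCs s)[j]) j (by rw [pvCl_length]; exact hj)
    ((pvCs_getElem s j hj).symm) (by rw [← pvCs]; exact pvCs_nodup s)

lemma pvCsI_getElem (s : List (Int × Int)) (j : Nat) (hj : j < (pvCs s).length) :
    pvCsI s j = (pvCs s)[j]'hj := by
  rw [pvCsI, PySem.List.pyGetD_natCast, List.getD_eq_getElem _ _ hj]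

lemma pvLoopA_invariant (n : Int) (s : List (Int × Int))
    (t : Nat) (ht : t + 1 ≤ (pvCs s).length) :
    ((PySem.List.pyRange 0 (t : Int) 1).foldl (pvBodyA s) (List.replicate (n + 1).toNat 0, 0)).2 =
        pvS s t ∧
    ((PySem.List.pyRange 0 (t : Int) 1).foldl (pvBodyA s)
        (List.replicate (n + 1).toNat 0, 0)).1.length = (n + 1).toNat ∧
    ∀ k : Nat, 1 ≤ k → k < (n + 1).toNat →
      ((PySem.List.pyRange 0 (t : Int) 1).foldl (pvBodyA s)
        (List.replicate (n + 1).toNat 0, 0)).1[k]? = some (pvPartial s t (k : Int)) := by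
  induction t with
  | zero =>
      rw [Nat.cast_zero, PySem.List.pyRange_one_eq_nil le_rfl, List.foldl_nil]
      refine ⟨rfl, by simp, ?_⟩
      intro k hk1 hk2
      show (List.replicate (n + 1).toNat (0 : Int))[k]? = _
      rw [List.getElem?_replicate, if_pos hk2]
      rfl
  | succ t ih =>
      have htq : t < (pvCs s).length := by omega
      have hrange : PySem.List.pyRange 0 ((t + 1 : Nat) : Int) 1 =
          PySem.List.pyRange 0 (t : Int) 1 ++ [(t : Int)] := by
        rw [show (((t + 1 : Nat)) : Int) = ((t : Int) + 1) by push_cast; ring]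
        exact PySem.List.pyRange_one_succ_right (by positivity)
      obtain ⟨ih2, ihlen, ihget⟩ := ih (by omega)
      rw [hrange, List.foldl_append, List.foldl_cons, List.foldl_nil]
      set stt := (PySem.List.pyRange 0 (t : Int) 1).foldl (pvBodyA s)
        (List.replicate (n + 1).toNat 0, 0) with hstt
      have hdiffget : PySem.List.pyGetD (pvDiffA s) (t : Int) 0 = pvD s t := by
        rw [PySem.List.pyGetD_natCast, List.getD_eq_getElem?_getD, pvDiffA_getElem s t htq]
        rfl
      have hcur : stt.2 + PySem.List.pyGetD (pvDiffA s) (t : Int) 0 = pvS s (t + 1) := by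
        rw [hdiffget, ih2]; rfl
      have hgap : PySem.List.pyGetD (pvSortedA s) ((t : Int) + 1) 0 -
          PySem.List.pyGetD (pvSortedA s) (t : Int) 0 = pvCsI s (t + 1) - pvCsI s t := by
        rw [pvSortedA_eq, show ((t : Int) + 1) = ((t + 1 : Nat) : Int) by push_cast; ring]
        rfl
      have hbody : pvBodyA s stt (t : Int) =
          ((if 0 < pvS s (t + 1) then
              stt.1.modify (pvS s (t + 1)).toNat (· + (pvCsI s (t + 1) - pvCsI s t))
            else stt.1), pvS s (t + 1)) := by
        simp only [pvBodyA]
        rw [hcur, hgap]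
      rw [hbody]
      refine ⟨rfl, ?_, ?_⟩
      · by_cases hpos : 0 < pvS s (t + 1)
        · rw [if_pos hpos]; simp [List.length_modify, ihlen]
        · rw [if_neg hpos]; exact ihlen
      · intro k hk1 hk2
        have hstep : pvPartial s (t + 1) (k : Int) = pvPartial s t (k : Int) +
            (if 0 < pvS s (t + 1) ∧ pvS s (t + 1) = (k : Int) then
              pvCsI s (t + 1) - pvCsI s t else 0) := rfl
        by_cases hpos : 0 < pvS s (t + 1)
        · rw [if_pos hpos]
          show (stt.1.modify (pvS s (t + 1)).toNat (· + (pvCsI s (t + 1) - pvCsI s t)))[k]? = _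
          rw [List.getElem?_modify, ihget k hk1 hk2]
          show some (if (pvS s (t + 1)).toNat = k then
              pvPartial s t (k : Int) + (pvCsI s (t + 1) - pvCsI s t)
            else pvPartial s t (k : Int)) = _
          by_cases hik : (pvS s (t + 1)).toNat = k
          · have hik' : pvS s (t + 1) = (k : Int) := by omega
            rw [if_pos hik, hstep, if_pos ⟨hpos, hik'⟩]
          · have hik' : pvS s (t + 1) ≠ (k : Int) := by omega
            rw [if_neg hik, hstep, if_neg (by tauto), add_zero]
        · rw [if_neg hpos, ihget k hk1 hk2, hstep, if_neg (by tauto), add_zero]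

lemma pvBridge (s : List (Int × Int)) (k : Int) :
    ∀ d : Nat, ∀ j : Nat, j + 1 + d = (pvCs s).length →
      pvBAdj (pvS s (j + 1)) (pvCsI s j) ((pvCl s).drop (j + 1)) k =
        pvPartial s ((pvCs s).length - 1) k - pvPartial s j k := by
  intro d
  induction d with
  | zero =>
      intro j hj
      have hdrop : (pvCl s).drop (j + 1) = [] := by
        apply List.drop_eq_nil_of_le
        rw [pvCl_length]; omega
      rw [hdrop]
      have : (pvCs s).length - 1 = j := by omega
      rw [this]
      simp [pvBAdj]
  | succ d ih =>
      intro j hj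
      have hj1 : j + 1 < (pvCl s).length := by rw [pvCl_length]; omega
      have hj1cs : j + 1 < (pvCs s).length := by rw [← pvCl_length]; exact hj1
      rw [List.drop_eq_getElem_cons hj1]
      rw [pvBAdj]
      have he2 : ((pvCl s)[j + 1]'hj1).2 = pvD s (j + 1) := (pvD_getElem s (j + 1) hj1cs).symm
      have he1 : ((pvCl s)[j + 1]'hj1).1 = pvCsI s (j + 1) := by
        rw [pvCsI_getElem s (j + 1) hj1cs, pvCs_getElem s (j + 1) hj1cs]
      rw [he2, he1]
      have hS : pvS s (j + 1) + pvD s (j + 1) = pvS s (j + 1 + 1) := rfl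
      rw [hS, ih (j + 1) (by omega)]
      have hstep : pvPartial s (j + 1) k = pvPartial s j k +
          (if 0 < pvS s (j + 1) ∧ pvS s (j + 1) = k then pvCsI s (j + 1) - pvCsI s j else 0) := rfl
      omega

lemma pvA_main (n : Int) (s : List (Int × Int)) :
    covered_points_count n s = (PySem.List.pyRange 1 (n + 1) 1).map (fun k => pvSpec s k) := by
  rw [covered_points_count, PySem.List.slice_from _ (by norm_num)]
  rw [show (1 : Int).toNat = 1 from rfl]
  -- characterize the loop result R
  have hR : (pvLoopA n s).1.length = (n + 1).toNat ∧
      ∀ k : Nat, 1 ≤ k → k < (n + 1).toNat →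
        (pvLoopA n s).1[k]? = some (pvSpec s (k : Int)) := by
    rcases Nat.eq_zero_or_pos (pvCs s).length with hq | hq
    · have hcl : pvCl s = [] := by
        have := pvCl_length s
        rw [hq] at this
        exact List.length_eq_zero_iff.mp this
      have hrange : PySem.List.pyRange 0 (((pvSortedA s).length : Int) - 1) 1 = [] := by
        apply PySem.List.pyRange_one_eq_nil
        rw [pvSortedA_eq, pvCs, hcl]
        simp
      rw [pvLoopA, hrange, List.foldl_nil]
      refine ⟨by simp, ?_⟩
      intro k hk1 hk2
      show (List.replicate (n + 1).toNat (0 : Int))[k]? = _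
      rw [List.getElem?_replicate, if_pos hk2, pvSpec, hcl]
      rfl
    · have hbound : (((pvSortedA s).length : Int) - 1) = (((pvCs s).length - 1 : Nat) : Int) := by
        rw [pvSortedA_eq]; push_cast; omega
      have hinv := pvLoopA_invariant n s ((pvCs s).length - 1) (by omega)
      rw [pvLoopA, hbound]
      refine ⟨hinv.2.1, ?_⟩
      intro k hk1 hk2
      rw [hinv.2.2 k hk1 hk2]
      -- pvSpec = pvPartial (q-1) via the reverse walk
      have hcl0 : 0 < (pvCl s).length := by rw [pvCl_length]; exact hq
      have hq0 : 0 < (pvCs s).length := hq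
      have hclcons : pvCl s = ((pvCl s)[0]'hcl0) :: (pvCl s).drop (0 + 1) := by
        conv_lhs => rw [← List.drop_zero (l := pvCl s)]
        rw [List.drop_eq_getElem_cons hcl0]
      have hbr := pvBridge s (k : Int) ((pvCs s).length - 1) 0 (by omega)
      have hS1 : pvS s (0 + 1) = ((pvCl s)[0]'hcl0).2 := by
        show pvS s 0 + pvD s 0 = _
        rw [pvD_getElem s 0 hq0]
        simp [pvS]
      have hC0 : pvCsI s 0 = ((pvCl s)[0]'hcl0).1 := by
        rw [pvCsI_getElem s 0 hq0, pvCs_getElem s 0 hq0]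
      have hspec : pvSpec s (k : Int) = pvPartial s ((pvCs s).length - 1) (k : Int) := by
        rw [pvSpec, show pvCl s = ((pvCl s)[0]'hcl0) :: (pvCl s).drop (0 + 1) from hclcons]
        show pvBAdj ((pvCl s)[0]'hcl0).2 ((pvCl s)[0]'hcl0).1 ((pvCl s).drop (0 + 1)) (k : Int) = _
        rw [← hS1, ← hC0, hbr]
        have h0 : pvPartial s 0 (k : Int) = 0 := rfl
        omega
      rw [hspec]
  obtain ⟨hlen, hget⟩ := hR
  apply List.ext_getElem?
  intro i
  rw [List.getElem?_drop, List.getElem?_map, PySem.List.getElem?_pyRange_one]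
  by_cases hi : i < ((n + 1) - 1).toNat
  · have h1 : 1 + i < (n + 1).toNat := by omega
    have hcast : ((1 + i : Nat) : Int) = 1 + (i : Int) := by push_cast; ring
    rw [hget (1 + i) (by omega) h1, if_pos hi, hcast]
    rfl
  · rw [if_neg hi]
    apply List.getElem?_eq_none
    omega

lemma pvFoldB_getD :
    ∀ (evl : List (Int × Int)) (d : PySem.Dict Int Int) (c p k : Int),
      ((evl.foldl pvBodyB (d, c, some p)).1).getD k 0 = d.getD k 0 + pvBAdj c p evl k := by
  intro evl
  induction evl with
  | nil => intro d c p k; simp [pvBAdj]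
  | cons e t ih =>
      intro d c p k
      rw [List.foldl_cons]
      have hb : pvBodyB (d, c, some p) e =
          ((if 0 < c then d.insert c (d.getD c 0 + (e.1 - p)) else d), c + e.2, some e.1) := rfl
      rw [hb, ih]
      simp only [pvBAdj]
      by_cases hc : 0 < c
      · rw [if_pos hc, PySem.Dict.getD_insert]
        by_cases hkc : k = c
        · subst hkc; rw [if_pos rfl, if_pos ⟨hc, rfl⟩]; ring
        · rw [if_neg hkc, if_neg (by tauto)]; ring
      · rw [if_neg hc, if_neg (by tauto)]; ring

lemma pvB_main (n : Int) (s : List (Int × Int)) :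
    covered_points_count_alt n s = (PySem.List.pyRange 1 (n + 1) 1).map (fun k => pvSpec s k) := by
  rw [covered_points_count_alt]
  apply List.map_congr_left
  intro k _
  rw [pvSweepB, pvSpec, pvCl]
  cases hse : pvSortB s with
  | nil => simp [pvCollapse, pvSpecOf, PySem.Dict.getD_empty]
  | cons e0 tl =>
      rw [List.foldl_cons]
      have hb : pvBodyB (PySem.Dict.empty, 0, none) e0 =
          (PySem.Dict.empty, 0 + e0.2, some e0.1) := rfl
      rw [hb, pvFoldB_getD tl _ _ _ k, PySem.Dict.getD_empty, zero_add, zero_add]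
      have := pvCollapse_head tl e0.1 e0.2 k
      rw [show ((e0.1, e0.2) : Int × Int) = e0 from rfl] at this
      rw [this]

-- ===== VERDICT (by name: the statement is the Claim_ definition above) =====
theorem covered_points_count_spec : Claim_equal_covered_points_count := by
  intro n s _ hpre
  unfold Spec_covered_points_count
  rw [pvA_main n s, pvB_main n s]
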